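-- pv_equiv track=rewrite | github.com/MaruvkaLab/MSMuTect3 | reformat_output.py | get_list
-- ===== SOURCE A (Python) =====
-- def get_list(segments, start_index):
--     i = start_index
--     if segments[i][-1] == "]":
--         return segments[i][1:-1], i
--     entries = [segments[i][1:]]
--     i+=1
--     while segments[i][-1] != ']':
--         entries.append(segments[i])
--         i+=1
--     entries.append(segments[i][:-1])
--     return " ".join(entries), i
-- ===== SOURCE B (Python) =====
-- def get_list(segments, start_index):
--     s, j = _scan(segments, start_index)
--     return s[1:-1], j
--
--
-- def _scan(segments, i):
--     # returns the raw text from segments[i] through the first segment whose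
--     # last character is ']', space-joined by recursive concatenation, and that index
--     seg = segments[i]
--     if seg[-1] == "]":
--         return seg, i
--     tail, j = _scan(segments, i + 1)
--     return seg + " " + tail, j
-- ===== Notes on version B (the rewrite author's own statement) =====
-- stated objective: simpler
-- what changed: B is a recursive decomposition: a helper recursively concatenates segments[i] + ' ' + rest down to the terminator (no entries list, no join, no single-token special case, no per-token stripping), and the top level strips the brackets off the whole string once.
import Mathlib
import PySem

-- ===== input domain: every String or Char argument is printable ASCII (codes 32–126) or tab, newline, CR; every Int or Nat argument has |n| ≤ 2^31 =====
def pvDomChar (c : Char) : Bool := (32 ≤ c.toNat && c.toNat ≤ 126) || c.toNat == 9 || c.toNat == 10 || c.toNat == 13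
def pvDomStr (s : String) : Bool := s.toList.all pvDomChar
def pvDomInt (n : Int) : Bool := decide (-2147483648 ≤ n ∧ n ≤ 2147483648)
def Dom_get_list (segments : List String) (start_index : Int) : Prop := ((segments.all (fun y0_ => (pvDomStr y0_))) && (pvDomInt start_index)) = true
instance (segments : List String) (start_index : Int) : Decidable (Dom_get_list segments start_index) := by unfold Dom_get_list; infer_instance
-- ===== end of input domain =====

-- B is a recursive decomposition: a helper concatenates segments[i] + " " + rest down to the
-- terminator (no entries list, no join, no single-token branch, no per-token stripping) and the
-- top level strips the brackets off the whole string once (objective: simpler; return value only).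

-- ===== PORT A =====
-- the while loop of A: i, entries are the loop state; fuel only bounds the (always finite) iteration
def getListAStep (segments : List String) : Nat → Int → List String → String × Int
  | 0, _, _ => ("", 0)
  | fuel+1, i, entries =>
    match PySem.List.pyGet? segments i with
    | none => ("", 0)                         -- IndexError: excluded by Pre_
    | some s =>
      match PySem.Str.pyGet? s (-1) with
      | none => ("", 0)                       -- IndexError on "": excluded by Pre_
      | some c =>
        if c ≠ ']' then getListAStep segments fuel (i+1) (entries ++ [s])
        else (PySem.Str.join " " (entries ++ [PySem.Str.slice s none (some (-1))]), i)

def get_list (segments : List String) (start_index : Int) : String × Int :=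
  match PySem.List.pyGet? segments start_index with
  | none => ("", 0)                           -- IndexError: excluded by Pre_
  | some s =>
    match PySem.Str.pyGet? s (-1) with
    | none => ("", 0)                         -- IndexError on "": excluded by Pre_
    | some c =>
      if c = ']' then (PySem.Str.slice s (some 1) (some (-1)), start_index)
      else getListAStep segments (2 * segments.length + 1) (start_index + 1)
             [PySem.Str.slice s (some 1) none]

-- ===== PORT B =====
-- B's recursive helper _scan; fuel only bounds the (always finite) recursion depth.
-- Python's 'seg + " " + tail' is ported by hand as String.mk on the concatenated char lists
-- (exact: str concatenation of these values is exactly list concatenation of their characters).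
def getListScan (segments : List String) : Nat → Int → Option (String × Int)
  | 0, _ => none
  | fuel+1, i =>
    match PySem.List.pyGet? segments i with
    | none => none                            -- IndexError: excluded by Pre_
    | some seg =>
      match PySem.Str.pyGet? seg (-1) with
      | none => none                          -- IndexError on "": excluded by Pre_
      | some c =>
        if c = ']' then some (seg, i)
        else
          match getListScan segments fuel (i+1) with
          | none => none
          | some (tail, j) => some (String.ofList (seg.toList ++ ' ' :: tail.toList), j)

def get_list_alt (segments : List String) (start_index : Int) : String × Int :=
  match getListScan segments (2 * segments.length + 1) start_index with
  | none => ("", 0)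
  | some (s, j) => (PySem.Str.slice s (some 1) (some (-1)), j)

-- ===== PRECONDITION & SPEC =====
-- segments[x] exists and ends in "]"
def TermAt (segments : List String) (x : Int) : Bool :=
  ((PySem.List.pyGet? segments x).map (fun s => PySem.Str.endswith s "]")).getD false
-- segments[x] exists and is nonempty
def NonemptyAt (segments : List String) (x : Int) : Bool :=
  ((PySem.List.pyGet? segments x).map (fun s => decide (s ≠ ""))).getD false

-- Pre_: A raises IndexError exactly when the scan from start_index meets no segment ending in "]"
-- before running off the list, or meets an empty segment first ("" has no last character).
def Pre_get_list (segments : List String) (start_index : Int) : Prop :=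
  ∃ t : Nat, t ≤ 2 * segments.length ∧ TermAt segments (start_index + t) = true ∧
    ∀ u : Nat, u ≤ t → NonemptyAt segments (start_index + u) = true
instance (segments : List String) (start_index : Int) : Decidable (Pre_get_list segments start_index) := by
  unfold Pre_get_list; infer_instance

def pvWitness_get_list : List String × Int := (["[a", "b", "c]"], 0)

def Spec_get_list (segments : List String) (start_index : Int) (out : String × Int) : Prop := out = get_list_alt segments start_index
instance (segments : List String) (start_index : Int) (out : String × Int) : Decidable (Spec_get_list segments start_index out) := by unfold Spec_get_list; infer_instance

-- ===== CLAIM (what is proved, stated in full; the proofs are below) =====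
def Claim_equal_get_list : Prop := ∀ (segments : List String) (start_index : Int), Dom_get_list segments start_index → Pre_get_list segments start_index → Spec_get_list segments start_index (get_list segments start_index)

-- ===== LEMMAS AND PROOFS =====

theorem pyGetD_of_pyGet?_some {α : Type} (xs : List α) (i : Int) (x d : α)
    (h : PySem.List.pyGet? xs i = some x) : PySem.List.pyGetD xs i d = x := by
  simp [PySem.List.pyGetD, h]

theorem endswith_iff_getLast? (s : String) :
    PySem.Str.endswith s "]" = true ↔ s.toList.getLast? = some ']' := by
  rw [show PySem.Str.endswith s "]" = PySem.Chars.endswith s.toList "]".toList from by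
        simp [PySem.Str.endswith_eq]]
  rw [PySem.Chars.endswith_iff]
  constructor
  · rintro ⟨p, h⟩
    rw [show ("]".toList) = [']'] from rfl] at h
    rw [← h]; simp
  · intro h
    rw [List.getLast?_eq_some_iff] at h
    obtain ⟨l', hl⟩ := h
    exact ⟨l', by rw [show ("]".toList) = [']'] from rfl, ← hl]⟩

theorem strPyGet_neg_one (s : String) : PySem.Str.pyGet? s (-1) = s.toList.getLast? := by
  simp [PySem.List.pyGet?_neg_one]

theorem toList_ne_nil_of_ne_empty (s : String) (h : s ≠ "") : s.toList ≠ [] := by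
  intro hnil
  exact h (String.toList_inj.mp (by rw [hnil]; rfl))

theorem slice_one_negone {α : Type} (cs : List α) :
    PySem.List.slice cs (some 1) (some (-1)) = cs.tail.dropLast := by
  cases cs with
  | nil => rfl
  | cons c cs' =>
    simp only [PySem.List.slice]
    have h1 : PySem.List.clampIdx (c :: cs').length 1 = 1 := by
      simp [PySem.List.clampIdx]
    have h2 : PySem.List.clampIdx (c :: cs').length (-1) = cs'.length := by
      simp [PySem.List.clampIdx]
    rw [h1, h2]
    simp [List.dropLast_eq_take]

theorem chars_join_cons_eq (sep : List Char) :
    ∀ (rest : List (List Char)) (x : List Char),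
    PySem.Chars.join sep (x :: rest) = x ++ rest.flatMap (fun z => sep ++ z) := by
  intro rest
  induction rest with
  | nil => intro x; simp [PySem.Chars.join_singleton]
  | cons r rs ih =>
    intro x
    rw [PySem.Chars.join_cons_cons, ih r]
    simp

-- joining a nonempty tail: " ".join peels one separator
theorem chars_join_cons_ne_nil (x : List Char) (rest : List (List Char)) (h : rest ≠ []) :
    PySem.Chars.join [' '] (x :: rest) = x ++ ' ' :: PySem.Chars.join [' '] rest := by
  cases rest with
  | nil => exact absurd rfl h
  | cons r rs =>
    rw [chars_join_cons_eq, chars_join_cons_eq]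
    simp

theorem tail_append_of_ne_nil {α : Type} (x r : List α) (h : x ≠ []) :
    (x ++ r).tail = x.tail ++ r := by
  cases x <;> simp_all

theorem chars_join_tail_dropLast (x y : List Char) (l : List (List Char))
    (hx : x ≠ []) (hy : y ≠ []) :
    (PySem.Chars.join [' '] (x :: (l ++ [y]))).tail.dropLast
      = PySem.Chars.join [' '] (x.tail :: (l ++ [y.dropLast])) := by
  rw [chars_join_cons_eq, chars_join_cons_eq]
  rw [List.flatMap_append, List.flatMap_append]
  simp only [List.flatMap_cons, List.flatMap_nil, List.append_nil]
  rw [tail_append_of_ne_nil _ _ hx]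
  have h1 : ([' '] ++ y) ≠ [] := by simp
  rw [show x.tail ++ (l.flatMap (fun z => [' '] ++ z) ++ ([' '] ++ y))
        = (x.tail ++ l.flatMap (fun z => [' '] ++ z)) ++ ([' '] ++ y) from by simp,
      List.dropLast_append_of_ne_nil h1,
      List.dropLast_append_of_ne_nil hy]
  simp

theorem str_join_slice (x y : String) (l : List String)
    (hx : x.toList ≠ []) (hy : y.toList ≠ []) :
    PySem.Str.slice (PySem.Str.join " " (x :: (l ++ [y]))) (some 1) (some (-1))
      = PySem.Str.join " " (PySem.Str.slice x (some 1) none :: (l ++ [PySem.Str.slice y none (some (-1))])) := by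
  apply String.toList_inj.mp
  rw [PySem.Str.toList_slice, PySem.Chars.slice_eq_listSlice, PySem.Str.toList_join, slice_one_negone,
      PySem.Str.toList_join]
  simp only [List.map_cons, List.map_append, List.map_cons]
  have hx' : (PySem.Str.slice x (some 1) none).toList = x.toList.tail := by
    rw [PySem.Str.toList_slice, PySem.Chars.slice_eq_listSlice, PySem.List.slice_from_one]
  have hy' : (PySem.Str.slice y none (some (-1))).toList = y.toList.dropLast := by
    rw [PySem.Str.toList_slice, PySem.Chars.slice_eq_listSlice, PySem.List.slice_to_neg_one]
  rw [hx', hy', show (" ".toList) = [' '] from rfl]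
  exact chars_join_tail_dropLast x.toList y.toList (l.map String.toList) hx hy

theorem str_join_singleton (x : String) : PySem.Str.join " " [x] = x := by
  apply String.toList_inj.mp
  rw [PySem.Str.toList_join]
  simp [PySem.Chars.join_singleton]

-- B's recursion computes the join of the visited tokens: if the first terminator from i is t
-- steps away and all segments up to it are nonempty, _scan returns exactly
-- (" ".join(segments[i..i+t]), i+t).
theorem scan_loop (segments : List String) :
  ∀ (t fuel : Nat) (i : Int),
    t < fuel →
    TermAt segments (i + t) = true →
    (∀ u : Nat, u ≤ t → NonemptyAt segments (i + u) = true) →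
    (∀ u : Nat, u < t → TermAt segments (i + u) = false) →
    getListScan segments fuel i =
      some (PySem.Str.join " "
        ((List.range (t+1)).map fun (u : Nat) => PySem.List.pyGetD segments (i + (u:Int)) ""),
        i + t) := by
  intro t
  induction t with
  | zero =>
    intro fuel i hfuel hterm hne _hmin
    cases fuel with
    | zero => omega
    | succ f =>
      have h0 := hne 0 (Nat.le_refl 0)
      unfold NonemptyAt at h0
      unfold TermAt at hterm
      rw [show i + ((0:Nat):Int) = i from by simp] at h0 hterm ⊢
      cases hs : PySem.List.pyGet? segments i with
      | none => rw [hs] at h0; simp at h0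
      | some s =>
        rw [hs] at h0 hterm
        simp only [Option.map_some, Option.getD_some, decide_eq_true_eq] at h0 hterm
        have hlast : s.toList.getLast? = some ']' := (endswith_iff_getLast? s).mp hterm
        show getListScan segments (f+1) i = _
        rw [getListScan, hs]
        dsimp only
        rw [strPyGet_neg_one, hlast]
        dsimp only
        rw [if_pos rfl]
        simp only [Nat.zero_add, List.range_one, List.map_cons, List.map_nil]
        rw [show i + ((0:Nat):Int) = i from by simp,
            pyGetD_of_pyGet?_some _ _ _ _ hs, str_join_singleton]
  | succ t ih =>
    intro fuel i hfuel hterm hne hmin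
    cases fuel with
    | zero => omega
    | succ f =>
      have h0 := hne 0 (Nat.zero_le _)
      have hm0 := hmin 0 (Nat.succ_pos t)
      unfold NonemptyAt at h0
      unfold TermAt at hm0
      rw [show i + ((0:Nat):Int) = i from by simp] at h0 hm0
      cases hs : PySem.List.pyGet? segments i with
      | none => rw [hs] at h0; simp at h0
      | some s =>
        rw [hs] at h0 hm0
        simp only [Option.map_some, Option.getD_some, decide_eq_true_eq] at h0 hm0
        have hnil := toList_ne_nil_of_ne_empty s h0
        obtain ⟨c, hc⟩ : ∃ c, s.toList.getLast? = some c := by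
          cases hl : s.toList.getLast? with
          | none => exact absurd (List.getLast?_eq_none_iff.mp hl) hnil
          | some c => exact ⟨c, rfl⟩
        have hcne : c ≠ ']' := by
          intro h
          rw [h] at hc
          rw [(endswith_iff_getLast? s).mpr hc] at hm0
          simp at hm0
        have IH := ih f (i+1) (by omega)
          (by rw [show (i+1) + ((t:Nat):Int) = i + (((t+1:Nat)):Int) from by push_cast; ring]; exact hterm)
          (fun u hu => by
            rw [show (i+1) + ((u:Nat):Int) = i + (((u+1:Nat)):Int) from by push_cast; ring]
            exact hne (u+1) (by omega))
          (fun u hu => by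
            rw [show (i+1) + ((u:Nat):Int) = i + (((u+1:Nat)):Int) from by push_cast; ring]
            exact hmin (u+1) (by omega))
        show getListScan segments (f+1) i = _
        rw [getListScan, hs]
        dsimp only
        rw [strPyGet_neg_one, hc]
        dsimp only
        have hshift : i + 1 + ((t:Nat):Int) = i + (((t+1:Nat)):Int) := by push_cast; ring
        have hstr : String.ofList (s.toList ++ ' ' ::
            (PySem.Str.join " " ((List.range (t+1)).map fun (u : Nat) =>
              PySem.List.pyGetD segments (i + 1 + (u:Int)) "")).toList)
            = PySem.Str.join " " ((List.range (t+1+1)).map fun (u : Nat) =>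
              PySem.List.pyGetD segments (i + (u:Int)) "") := by
          apply String.toList_inj.mp
          simp only [String.toList_ofList, PySem.Str.toList_join]
          rw [show (" ".toList) = [' '] from rfl]
          rw [show List.range (t+1+1) = 0 :: (List.range (t+1)).map Nat.succ from
                List.range_succ_eq_map]
          rw [List.map_cons, List.map_cons, List.map_map, List.map_map]
          rw [show i + ((0:Nat):Int) = i from by simp,
              pyGetD_of_pyGet?_some _ _ _ _ hs]
          rw [chars_join_cons_ne_nil _ _ (by simp)]
          congr 1
          rw [List.map_map]
          congr 1
          congr 1
          apply List.map_congr_left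
          intro u _
          simp only [Function.comp_apply]
          congr 2
          push_cast
          ring
        rw [if_neg hcne, IH]
        dsimp only
        rw [hstr, hshift]

-- the A-side loop: after the first (non-terminator) token, getListAStep joins the accumulated
-- entries, the visited middle tokens and the stripped terminator.
theorem main_loop (segments : List String) :
  ∀ (t fuel : Nat) (i : Int) (entries : List String),
    t < fuel →
    TermAt segments (i + t) = true →
    (∀ u : Nat, u ≤ t → NonemptyAt segments (i + u) = true) →
    (∀ u : Nat, u < t → TermAt segments (i + u) = false) →
    getListAStep segments fuel i entries =
      (PySem.Str.join " " (entries ++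
         ((List.range t).map fun (u : Nat) => PySem.List.pyGetD segments (i + (u:Int)) "") ++
         [PySem.Str.slice (PySem.List.pyGetD segments (i + t) "") none (some (-1))]),
       i + t) := by
  intro t
  induction t with
  | zero =>
    intro fuel i entries hfuel hterm hne _hmin
    cases fuel with
    | zero => omega
    | succ f =>
      have h0 := hne 0 (Nat.le_refl 0)
      unfold NonemptyAt at h0
      unfold TermAt at hterm
      rw [show i + ((0:Nat):Int) = i from by simp] at h0 hterm ⊢
      cases hs : PySem.List.pyGet? segments i with
      | none => rw [hs] at h0; simp at h0
      | some s =>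
        rw [hs] at h0 hterm
        simp only [Option.map_some, Option.getD_some, decide_eq_true_eq] at h0 hterm
        have hlast : s.toList.getLast? = some ']' := (endswith_iff_getLast? s).mp hterm
        show getListAStep segments (f+1) i entries = _
        rw [getListAStep, hs]
        dsimp only
        rw [strPyGet_neg_one, hlast]
        dsimp only
        simp only [ne_eq, not_true_eq_false, if_false, List.range_zero, List.map_nil,
          List.append_nil]
        rw [pyGetD_of_pyGet?_some _ _ _ _ hs]
  | succ t ih =>
    intro fuel i entries hfuel hterm hne hmin
    cases fuel with
    | zero => omega
    | succ f =>
      have h0 := hne 0 (Nat.zero_le _)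
      have hm0 := hmin 0 (Nat.succ_pos t)
      unfold NonemptyAt at h0
      unfold TermAt at hm0
      rw [show i + ((0:Nat):Int) = i from by simp] at h0 hm0
      cases hs : PySem.List.pyGet? segments i with
      | none => rw [hs] at h0; simp at h0
      | some s =>
        rw [hs] at h0 hm0
        simp only [Option.map_some, Option.getD_some, decide_eq_true_eq] at h0 hm0
        have hnil := toList_ne_nil_of_ne_empty s h0
        obtain ⟨c, hc⟩ : ∃ c, s.toList.getLast? = some c := by
          cases hl : s.toList.getLast? with
          | none => exact absurd (List.getLast?_eq_none_iff.mp hl) hnil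
          | some c => exact ⟨c, rfl⟩
        have hcne : c ≠ ']' := by
          intro h
          rw [h] at hc
          rw [(endswith_iff_getLast? s).mpr hc] at hm0
          simp at hm0
        have IH := ih f (i+1) (entries ++ [s]) (by omega)
          (by rw [show (i+1) + ((t:Nat):Int) = i + (((t+1:Nat)):Int) from by push_cast; ring]; exact hterm)
          (fun u hu => by
            rw [show (i+1) + ((u:Nat):Int) = i + (((u+1:Nat)):Int) from by push_cast; ring]
            exact hne (u+1) (by omega))
          (fun u hu => by
            rw [show (i+1) + ((u:Nat):Int) = i + (((u+1:Nat)):Int) from by push_cast; ring]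
            exact hmin (u+1) (by omega))
        have hshift : i + 1 + ((t:Nat):Int) = i + (((t+1:Nat)):Int) := by push_cast; ring
        show getListAStep segments (f+1) i entries = _
        rw [getListAStep, hs]
        dsimp only
        rw [strPyGet_neg_one, hc]
        dsimp only
        rw [if_pos hcne, IH]
        rw [hshift]
        congr 2
        rw [List.range_succ_eq_map, List.map_cons, List.map_map]
        rw [show PySem.List.pyGetD segments (i + ((0:Nat):Int)) "" = s from by
              rw [show i + ((0:Nat):Int) = i from by simp]
              exact pyGetD_of_pyGet?_some _ _ _ _ hs]
        rw [show List.map ((fun (u:Nat) => PySem.List.pyGetD segments (i + (u:Int)) "") ∘ Nat.succ) (List.range t)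
              = List.map (fun (u:Nat) => PySem.List.pyGetD segments (i + 1 + (u:Int)) "") (List.range t) from by
              apply List.map_congr_left
              intro u _
              simp only [Function.comp_apply]
              congr 1
              push_cast
              ring]
        simp

-- ===== VERDICT =====
theorem get_list_spec : Claim_equal_get_list := by
  intro segments start _dom hpre
  unfold Spec_get_list
  obtain ⟨t0, ht0le, ht0term, ht0ne⟩ := hpre
  have hex : ∃ t : Nat, TermAt segments (start + t) = true := ⟨t0, ht0term⟩
  obtain ⟨t, htterm, htmin, htne, hlen⟩ :
      ∃ t : Nat, TermAt segments (start + t) = true ∧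
        (∀ u : Nat, u < t → TermAt segments (start + u) = false) ∧
        (∀ u : Nat, u ≤ t → NonemptyAt segments (start + u) = true) ∧
        t ≤ 2 * segments.length := by
    refine ⟨Nat.find hex, Nat.find_spec hex, ?_, ?_, ?_⟩
    · intro u hu
      have := Nat.find_min hex hu
      simpa using this
    · intro u hu
      exact ht0ne u (le_trans hu (Nat.find_min' hex ht0term))
    · exact le_trans (Nat.find_min' hex ht0term) ht0le
  have hscan := scan_loop segments t (2 * segments.length + 1) start (by omega) htterm htne htmin
  rw [get_list_alt, hscan]
  dsimp only
  have h0 := htne 0 (Nat.zero_le _)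
  unfold NonemptyAt at h0
  rw [show start + ((0:Nat):Int) = start from by simp] at h0
  cases hs : PySem.List.pyGet? segments start with
  | none => rw [hs] at h0; simp at h0
  | some s0 =>
    rw [hs] at h0
    simp only [Option.map_some, Option.getD_some, decide_eq_true_eq] at h0
    have hnil0 := toList_ne_nil_of_ne_empty s0 h0
    cases t with
    | zero =>
      have hterm0 : PySem.Str.endswith s0 "]" = true := by
        unfold TermAt at htterm
        rw [show start + ((0:Nat):Int) = start from by simp, hs] at htterm
        simpa using htterm
      have hlast : s0.toList.getLast? = some ']' := (endswith_iff_getLast? s0).mp hterm0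
      rw [get_list, hs]
      dsimp only
      rw [strPyGet_neg_one, hlast]
      dsimp only
      rw [if_pos rfl]
      simp only [Nat.zero_add, List.range_one, List.map_cons, List.map_nil]
      rw [show PySem.List.pyGetD segments (start + ((0:Nat):Int)) "" = s0 from by
            rw [show start + ((0:Nat):Int) = start from by simp]
            exact pyGetD_of_pyGet?_some _ _ _ _ hs]
      rw [str_join_singleton]
      simp
    | succ t' =>
      have hm0 : PySem.Str.endswith s0 "]" = false := by
        have := htmin 0 (Nat.succ_pos t')
        unfold TermAt at this
        rw [show start + ((0:Nat):Int) = start from by simp, hs] at this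
        simpa using this
      obtain ⟨c0, hc0⟩ : ∃ c, s0.toList.getLast? = some c := by
        cases hl : s0.toList.getLast? with
        | none => exact absurd (List.getLast?_eq_none_iff.mp hl) hnil0
        | some c => exact ⟨c, rfl⟩
      have hc0ne : c0 ≠ ']' := by
        intro h
        rw [h] at hc0
        rw [(endswith_iff_getLast? s0).mpr hc0] at hm0
        simp at hm0
      have hshift : ∀ u : Nat, (start + 1) + (u:Int) = start + (((u+1:Nat)):Int) := by
        intro u; push_cast; ring
      have hterm' : TermAt segments ((start+1) + (t':Int)) = true := by
        rw [hshift t']; exact htterm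
      have hne' : ∀ u : Nat, u ≤ t' → NonemptyAt segments ((start+1) + (u:Int)) = true := by
        intro u hu; rw [hshift u]; exact htne (u+1) (by omega)
      have hmin' : ∀ u : Nat, u < t' → TermAt segments ((start+1) + (u:Int)) = false := by
        intro u hu; rw [hshift u]; exact htmin (u+1) (by omega)
      have MLA := main_loop segments t' (2 * segments.length + 1) (start+1)
        [PySem.Str.slice s0 (some 1) none] (by omega) hterm' hne' hmin'
      -- the terminator token
      obtain ⟨y, hy, hyne⟩ : ∃ y, PySem.List.pyGet? segments ((start+1) + (t':Int)) = some y ∧ y ≠ "" := by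
        have := htne (t'+1) (Nat.le_refl _)
        unfold NonemptyAt at this
        rw [← hshift t'] at this
        cases hyy : PySem.List.pyGet? segments ((start+1) + (t':Int)) with
        | none => rw [hyy] at this; simp at this
        | some y =>
          rw [hyy] at this
          simp only [Option.map_some, Option.getD_some, decide_eq_true_eq] at this
          exact ⟨y, rfl, this⟩
      have htok : PySem.List.pyGetD segments ((start+1) + (t':Int)) "" = y :=
        pyGetD_of_pyGet?_some _ _ _ _ hy
      rw [get_list, hs]
      dsimp only
      rw [strPyGet_neg_one, hc0]
      dsimp only
      rw [if_neg hc0ne, MLA]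
      rw [show List.range (t'+1+1) = 0 :: (List.range (t'+1)).map Nat.succ from
            List.range_succ_eq_map]
      rw [List.map_cons, List.map_map]
      rw [show PySem.List.pyGetD segments (start + ((0:Nat):Int)) "" = s0 from by
            rw [show start + ((0:Nat):Int) = start from by simp]
            exact pyGetD_of_pyGet?_some _ _ _ _ hs]
      rw [show List.map ((fun (u:Nat) => PySem.List.pyGetD segments (start + (u:Int)) "") ∘ Nat.succ) (List.range (t'+1))
            = List.map (fun (u:Nat) => PySem.List.pyGetD segments ((start+1) + (u:Int)) "") (List.range (t'+1)) from by
            apply List.map_congr_left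
            intro u _
            simp only [Function.comp_apply]
            rw [hshift u]]
      rw [List.range_succ, List.map_append, List.map_cons, List.map_nil, htok]
      rw [show (s0 :: (List.map (fun (u:Nat) => PySem.List.pyGetD segments ((start+1) + (u:Int)) "") (List.range t') ++ [y]))
            = s0 :: ((List.map (fun (u:Nat) => PySem.List.pyGetD segments ((start+1) + (u:Int)) "") (List.range t')) ++ [y]) from rfl]
      rw [str_join_slice s0 y _ hnil0 (toList_ne_nil_of_ne_empty y hyne)]
      rw [show start + (((t'+1:Nat)):Int) = (start+1) + (t':Int) from by push_cast; ring]
      simp
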